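-- pv_equiv track=rewrite | github.com/gfetterman/bark-extra | entries_containing.py | group_entry_names
-- ===== SOURCE A (Python) =====
-- ENTRY_PREFIX = 'jrecord_'
--
-- def group_entry_names(entries, prefix=ENTRY_PREFIX):
--     for e in entries:
--         if not e.startswith(prefix):
--             raise ValueError('not every entry begins with "{}"'.format(prefix))
--     if not entries:
--         return []
--     else:
--         sorted_entries = sorted(entries)
--         groups = [[sorted_entries[0]]]
--         for e in sorted_entries[1:]:
--             if int(e[len(prefix):]) == int(groups[-1][-1][len(prefix):]) + 1:
--                 groups[-1].append(e)
--             else: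
--                 groups.append([e])
--         return groups
-- ===== SOURCE B (Python) =====
-- ENTRY_PREFIX = 'jrecord_'
--
-- def group_entry_names(entries, prefix=ENTRY_PREFIX):
--     for e in entries:
--         if not e.startswith(prefix):
--             raise ValueError('not every entry begins with "{}"'.format(prefix))
--
--     def chop(lst):
--         # recursively peel off the maximal leading run of consecutive suffixes
--         if not lst:
--             return []
--         j = 1
--         while j < len(lst) and int(lst[j][len(prefix):]) == int(lst[j - 1][len(prefix):]) + 1:
--             j += 1
--         return [lst[:j]] + chop(lst[j:])
--
--     return chop(sorted(entries))
-- ===== Notes on version B (the rewrite author's own statement) =====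
-- stated objective: alternative
-- what changed: B replaces A's single forward loop that mutates the last group of an accumulator with a recursive decomposition: it scans for the length j of the maximal leading run of consecutive suffixes, slices that run off the front, and recurses on the rest.
import Mathlib
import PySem

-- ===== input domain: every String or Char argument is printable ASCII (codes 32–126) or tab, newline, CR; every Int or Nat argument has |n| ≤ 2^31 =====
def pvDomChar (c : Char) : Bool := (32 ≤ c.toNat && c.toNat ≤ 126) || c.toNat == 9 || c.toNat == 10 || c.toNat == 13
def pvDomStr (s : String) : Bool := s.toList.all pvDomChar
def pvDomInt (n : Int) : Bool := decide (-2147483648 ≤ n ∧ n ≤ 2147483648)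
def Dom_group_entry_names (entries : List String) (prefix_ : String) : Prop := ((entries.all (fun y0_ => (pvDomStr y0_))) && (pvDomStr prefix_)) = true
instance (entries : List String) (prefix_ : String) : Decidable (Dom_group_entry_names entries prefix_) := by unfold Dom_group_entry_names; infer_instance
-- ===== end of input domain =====

-- B regroups by recursion: peel the maximal leading run of consecutive suffixes off the sorted
-- list and recurse on the rest, instead of A's forward loop mutating the last accumulated group;
-- same O(n log n) cost, a different decomposition; equivalence of the RETURN values proved on Pre_.

-- int(e[len(prefix):]) — shared by both ports (Pre_ guarantees the parse succeeds where it is reached)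
def pvNum (prefix_ e : String) : Int :=
  (PySem.Int.ofStr? (PySem.Str.slice e (some (PySem.Str.len prefix_)) none)).getD 0

-- ===== PORT A =====
-- body of A's for-loop: append e to the last group on a consecutive suffix, else start a new group
def stepA (prefix_ : String) (groups : List (List String)) (e : String) : List (List String) :=
  if pvNum prefix_ e == pvNum prefix_ ((groups.getLastD []).getLastD "") + 1 then
    groups.dropLast ++ [groups.getLastD [] ++ [e]]
  else
    groups ++ [[e]]

def group_entry_names (entries : List String) (prefix_ : String) : List (List String) :=
  -- the validation loop only raises (outside Pre_); on Pre_ it is a no-op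
  if entries.isEmpty then
    []
  else
    let sorted_entries := PySem.List.sorted entries (fun x => x)
    match sorted_entries with
    | [] => []
    | e0 :: rest => rest.foldl (stepA prefix_) [[e0]]   -- groups = [[sorted_entries[0]]]; for e in sorted_entries[1:]

-- ===== PORT B =====
-- lst[i] (always in range where B reads it)
def getAt (lst : List String) (i : Int) : String := (PySem.List.pyGet? lst i).getD ""

-- the 'while j < len(lst) and int(lst[j][len(prefix):]) == int(lst[j-1][len(prefix):]) + 1: j += 1'
-- scan; the fuel argument only makes the loop structurally recursive (it never runs out: each
-- iteration requires j < len(lst), so len(lst) iterations always suffice)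
def scanJ (p : String) (lst : List String) : Nat → Nat → Nat
  | 0, j => j
  | fuel + 1, j =>
    if j < lst.length ∧ (pvNum p (getAt lst (j : Int)) == pvNum p (getAt lst ((j : Int) - 1)) + 1) = true then
      scanJ p lst fuel (j + 1)
    else j

-- chop(lst): slice off the maximal leading run, recurse on the remainder (fuel as above: each
-- recursive call strictly shortens the list, so len(lst) levels always suffice)
def chop (p : String) : Nat → List String → List (List String)
  | _, [] => []
  | 0, _ :: _ => []
  | fuel + 1, x :: l =>
    let j := scanJ p (x :: l) (x :: l).length 1
    PySem.List.slice (x :: l) none (some (j : Int)) :: chop p fuel (PySem.List.slice (x :: l) (some (j : Int)) none)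

def group_entry_names_alt (entries : List String) (prefix_ : String) : List (List String) :=
  -- the validation loop only raises (outside Pre_); on Pre_ it is a no-op
  let s := PySem.List.sorted entries (fun x => x)
  chop prefix_ s.length s

-- ===== PRECONDITION & SPEC =====
-- A raises ValueError when some entry lacks the prefix, or when len(entries) ≥ 2 and some suffix
-- is not an int literal (with one entry int() is never called); exactly those inputs are excluded.
def Pre_group_entry_names (entries : List String) (prefix_ : String) : Prop :=
  (∀ e ∈ entries, PySem.Str.startswith e prefix_ = true) ∧
  (entries.length ≤ 1 ∨
    ∀ e ∈ entries, (PySem.Int.ofStr? (PySem.Str.slice e (some (PySem.Str.len prefix_)) none)).isSome = true)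
instance (entries : List String) (prefix_ : String) : Decidable (Pre_group_entry_names entries prefix_) := by unfold Pre_group_entry_names; infer_instance

def pvWitness_group_entry_names : List String × String := (["jrecord_1", "jrecord_2", "jrecord_7"], "jrecord_")

def Spec_group_entry_names (entries : List String) (prefix_ : String) (out : List (List String)) : Prop := out = group_entry_names_alt entries prefix_
instance (entries : List String) (prefix_ : String) (out : List (List String)) : Decidable (Spec_group_entry_names entries prefix_ out) := by unfold Spec_group_entry_names; infer_instance

-- ===== CLAIM (what is proved, stated in full; the proofs are below) =====
def Claim_equal_group_entry_names : Prop := ∀ (entries : List String) (prefix_ : String), Dom_group_entry_names entries prefix_ → Pre_group_entry_names entries prefix_ → Spec_group_entry_names entries prefix_ (group_entry_names entries prefix_)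

-- ===== LEMMAS AND PROOFS =====

-- canonical cons-structured grouping (proof-side only): foldr over the sorted list
def stepB (prefix_ : String) (e : String) (gs : List (List String)) : List (List String) :=
  match gs with
  | (f :: r) :: rest =>
      if pvNum prefix_ f == pvNum prefix_ e + 1 then (e :: f :: r) :: rest else [e] :: (f :: r) :: rest
  | _ => [[e]]

def runsB (prefix_ : String) (l : List String) : List (List String) := l.foldr (stepB prefix_) []

theorem runsB_cons (p e : String) (l : List String) : runsB p (e :: l) = stepB p e (runsB p l) := rfl

theorem runsB_head (p : String) : ∀ (l : List String) (e : String),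
    ∃ (r : List String) (rest : List (List String)), runsB p (e :: l) = (e :: r) :: rest := by
  intro l
  induction l with
  | nil => intro e; exact ⟨[], [], rfl⟩
  | cons b l ih =>
    intro e
    obtain ⟨r, rest, h⟩ := ih b
    rw [runsB_cons, h]
    unfold stepB
    by_cases hc : (pvNum p b == pvNum p e + 1) = true
    · exact ⟨b :: r, rest, by simp [hc]⟩
    · exact ⟨[], (b :: r) :: rest, by simp [hc]⟩

-- the while loop only increases j
theorem scanJ_ge (p : String) (lst : List String) : ∀ (fuel j : Nat), j ≤ scanJ p lst fuel j := by
  intro fuel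
  induction fuel with
  | zero => intro j; simp [scanJ]
  | succ n ih =>
    intro j
    rw [scanJ]
    split
    · exact le_trans (by omega) (ih (j + 1))
    · exact le_refl j

-- one unfolding of chop on a nonempty list
theorem chop_cons (p x : String) (l : List String) (fuel : Nat) :
    chop p (fuel + 1) (x :: l) =
      PySem.List.slice (x :: l) none (some ((scanJ p (x :: l) (x :: l).length 1 : Nat) : Int)) ::
        chop p fuel (PySem.List.slice (x :: l) (some ((scanJ p (x :: l) (x :: l).length 1 : Nat) : Int)) none) := by
  rw [chop]

-- the scan shifts under a cons: dropping the head decrements the surviving indices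
theorem scanJ_shift (p x : String) (xs : List String) : ∀ (fuel j : Nat), 1 ≤ j → xs.length ≤ j + fuel →
    scanJ p (x :: xs) fuel (j + 1) = scanJ p xs fuel j + 1 := by
  intro fuel
  induction fuel with
  | zero => intro j _ _; simp [scanJ]
  | succ n ih =>
    intro j hj hlen
    conv_lhs => rw [scanJ]
    conv_rhs => rw [scanJ]
    have hidx1 : getAt (x :: xs) ((j : Int) + 1) = getAt xs (j : Int) := by
      unfold getAt; rw [PySem.List.pyGet?_cons_succ]
    have hidx2 : getAt (x :: xs) ((j : Int) + 1 - 1) = getAt xs ((j : Int) - 1) := by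
      have h1 : ((j : Int) + 1 - 1) = (((j - 1 : Nat) : Int) + 1) := by omega
      have h2 : ((j : Int) - 1) = ((j - 1 : Nat) : Int) := by omega
      unfold getAt; rw [h1, h2, PySem.List.pyGet?_cons_succ]
    have hcast : (((j + 1 : Nat)) : Int) = (j : Int) + 1 := by push_cast; ring
    by_cases hc : j < xs.length ∧ (pvNum p (getAt xs (j : Int)) == pvNum p (getAt xs ((j : Int) - 1)) + 1) = true
    · have hc' : j + 1 < (x :: xs).length ∧
          (pvNum p (getAt (x :: xs) ((j + 1 : Nat) : Int)) == pvNum p (getAt (x :: xs) (((j + 1 : Nat) : Int) - 1)) + 1) = true := by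
        rw [hcast, hidx1, hidx2]
        exact ⟨by simp; omega, hc.2⟩
      rw [if_pos hc', if_pos hc]
      exact ih (j + 1) (by omega) (by omega)
    · have hc' : ¬ (j + 1 < (x :: xs).length ∧
          (pvNum p (getAt (x :: xs) ((j + 1 : Nat) : Int)) == pvNum p (getAt (x :: xs) (((j + 1 : Nat) : Int) - 1)) + 1) = true) := by
        rw [hcast, hidx1, hidx2]
        intro h
        exact hc ⟨by have := h.1; simp at this; omega, h.2⟩
      rw [if_neg hc', if_neg hc]

-- B's recursion computes the canonical grouping (for any sufficient fuel)
theorem chop_eq_runsB (p : String) : ∀ (n : Nat) (lst : List String) (fuel : Nat),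
    lst.length ≤ n → lst.length ≤ fuel → chop p fuel lst = runsB p lst := by
  intro n
  induction n with
  | zero =>
    intro lst fuel hn _
    have : lst = [] := List.length_eq_zero_iff.mp (by omega)
    subst this
    cases fuel <;> rfl
  | succ n ih =>
    intro lst fuel hn hfuel
    match lst, fuel with
    | [], fl => cases fl <;> rfl
    | [e], fl + 1 =>
      rw [chop_cons]
      have hscan : scanJ p [e] ([e]).length 1 = 1 := by
        rw [show ([e] : List String).length = 0 + 1 from rfl, scanJ]
        rw [if_neg (by simp)]
      rw [hscan, PySem.List.slice_to_natCast, PySem.List.slice_from_natCast]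
      simp only [List.take_succ_cons, List.take_zero, List.drop_succ_cons, List.drop_zero]
      cases fl <;> rfl
    | e :: f :: t, fl + 1 =>
      have hn' : (f :: t).length ≤ n := by simp at hn ⊢; omega
      have hfl : (f :: t).length ≤ fl := by simp at hfuel ⊢; omega
      have hC0 : getAt (e :: f :: t) ((1 : Nat) : Int) = f := by
        unfold getAt
        rw [show ((1 : Nat) : Int) = ((0 : Nat) : Int) + 1 by norm_num, PySem.List.pyGet?_cons_succ,
          PySem.List.pyGet?_natCast]
        rfl
      have hC1 : getAt (e :: f :: t) (((1 : Nat) : Int) - 1) = e := by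
        unfold getAt
        rw [show ((1 : Nat) : Int) - 1 = 0 by norm_num, PySem.List.pyGet?_zero_cons]
        rfl
      obtain ⟨r', rest', hruns⟩ := runsB_head p t f
      have hlen2 : (e :: f :: t).length = (t.length + 1) + 1 := by simp
      by_cases hc : (pvNum p f == pvNum p e + 1) = true
      · -- e's run continues into f's run
        have hscan : scanJ p (e :: f :: t) (e :: f :: t).length 1 = scanJ p (f :: t) (f :: t).length 1 + 1 := by
          rw [hlen2, scanJ]
          rw [if_pos ⟨by simp, by rw [hC0, hC1]; exact hc⟩]
          rw [show (f :: t).length = t.length + 1 from rfl]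
          exact scanJ_shift p e (f :: t) (t.length + 1) 1 (by omega) (by simp)
        -- unfold chop on (f :: t) to read off its head group and tail, via the IH
        have ihft : chop p ((f :: t).length) (f :: t) = (f :: r') :: rest' := by
          rw [ih (f :: t) (f :: t).length hn' (le_refl _), hruns]
        rw [show (f :: t).length = t.length + 1 from rfl] at ihft
        rw [chop_cons p f t t.length] at ihft
        rw [PySem.List.slice_to_natCast, PySem.List.slice_from_natCast] at ihft
        have htake := (List.cons.inj ihft).1
        have hdrop := (List.cons.inj ihft).2
        rw [show (f :: t).length = t.length + 1 from rfl] at htake hdrop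
        -- the tail groups, fuel-independently
        set j' := scanJ p (f :: t) (t.length + 1) 1 with hj'
        have hj1 : 1 ≤ j' := scanJ_ge p (f :: t) (t.length + 1) 1
        have hdroplen : ((f :: t).drop j').length ≤ n := by simp; omega
        have hrest : runsB p ((f :: t).drop j') = rest' := by
          rw [← ih ((f :: t).drop j') t.length hdroplen (by simp; omega), hdrop]
        rw [chop_cons p e (f :: t) fl, hscan]
        rw [show (f :: t).length = t.length + 1 from rfl]
        rw [← hj']
        rw [PySem.List.slice_to_natCast, PySem.List.slice_from_natCast]
        have htake' : (e :: f :: t).take (j' + 1) = e :: (f :: t).take j' := rfl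
        have hdrop' : (e :: f :: t).drop (j' + 1) = (f :: t).drop j' := rfl
        rw [htake', hdrop', htake]
        rw [ih ((f :: t).drop j') fl hdroplen (by simp at hfl ⊢; omega), hrest]
        rw [runsB_cons, hruns]
        simp [stepB, hc]
      · -- e is alone in its group
        have hscan : scanJ p (e :: f :: t) (e :: f :: t).length 1 = 1 := by
          rw [hlen2, scanJ]
          rw [if_neg (by intro h; rw [hC0, hC1] at h; exact hc h.2)]
        rw [chop_cons p e (f :: t) fl, hscan, PySem.List.slice_to_natCast, PySem.List.slice_from_natCast]
        simp only [List.take_succ_cons, List.take_zero, List.drop_succ_cons, List.drop_zero]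
        rw [ih (f :: t) fl hn' hfl, hruns]
        rw [runsB_cons, hruns]
        simp [stepB, hc]

theorem group_entry_names_alt_eq (entries : List String) (p : String) :
    group_entry_names_alt entries p = runsB p (PySem.List.sorted entries (fun x => x)) := by
  unfold group_entry_names_alt
  exact chop_eq_runsB p _ _ _ (le_refl _) (le_refl _)

-- A's forward loop, characterised against runsB
theorem keyA (p : String) : ∀ (l : List String) (gs : List (List String)) (cur : List String)
    (last : String) (r : List String) (rest : List (List String)),
    cur.getLast? = some last →
    runsB p (last :: l) = (last :: r) :: rest →
    l.foldl (stepA p) (gs ++ [cur]) = gs ++ (cur ++ r) :: rest := by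
  intro l
  induction l with
  | nil =>
    intro gs cur last r rest hcur hruns
    have : ((last :: r) :: rest : List (List String)) = [[last]] := by rw [← hruns]; rfl
    obtain ⟨h1, h2⟩ : (last :: r = [last]) ∧ rest = [] := by
      constructor <;> [exact (List.cons.inj this).1; exact (List.cons.inj this).2]
    have hr : r = [] := by simpa using h1
    subst hr; subst h2
    simp
  | cons e l ih =>
    intro gs cur last r rest hcur hruns
    obtain ⟨r', rest', h'⟩ := runsB_head p l e
    have hstep : runsB p (last :: e :: l) = stepB p last ((e :: r') :: rest') := by
      rw [runsB_cons, h']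
    have hlastD : (gs ++ [cur]).getLastD [] = cur := by simp
    have hcurD : cur.getLastD "" = last := by
      rw [List.getLastD_eq_getLast?, hcur]; rfl
    simp only [List.foldl_cons]
    by_cases hc : (pvNum p e == pvNum p last + 1) = true
    · -- consecutive: e joins the current group
      have hA : stepA p (gs ++ [cur]) e = gs ++ [cur ++ [e]] := by
        unfold stepA
        rw [hlastD, hcurD, if_pos hc, List.dropLast_concat]
      have hB : runsB p (last :: e :: l) = (last :: e :: r') :: rest' := by
        rw [hstep]; simp [stepB, hc]
      rw [hruns] at hB
      obtain ⟨hre, hrest⟩ : r = e :: r' ∧ rest = rest' := by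
        have h1 := (List.cons.inj hB).1
        have h2 := (List.cons.inj hB).2
        exact ⟨(List.cons.inj h1).2, h2⟩
      rw [hre, hrest, hA, ih gs (cur ++ [e]) e r' rest' (by simp) h']
      simp
    · -- gap: e starts a new group
      have hA : stepA p (gs ++ [cur]) e = (gs ++ [cur]) ++ [[e]] := by
        unfold stepA
        rw [hlastD, hcurD, if_neg hc]
      have hB : runsB p (last :: e :: l) = [last] :: (e :: r') :: rest' := by
        rw [hstep]; simp [stepB, hc]
      rw [hruns] at hB
      obtain ⟨hre, hrest⟩ : r = [] ∧ rest = (e :: r') :: rest' := by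
        have h1 := (List.cons.inj hB).1
        have h2 := (List.cons.inj hB).2
        exact ⟨by simpa using (List.cons.inj h1).2, h2⟩
      rw [hre, hrest, hA, ih (gs ++ [cur]) [e] e r' rest' (by simp) h']
      simp

theorem main_eq (entries : List String) (p : String) :
    group_entry_names entries p = group_entry_names_alt entries p := by
  rw [group_entry_names_alt_eq]
  unfold group_entry_names
  by_cases h : entries = []
  · subst h
    simp [runsB, (PySem.List.sorted_eq_nil_iff ([] : List String) (fun x => x) false).mpr rfl]
  · have hne : entries.isEmpty = false := by simpa [List.isEmpty_iff] using h
    rw [hne]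
    simp only [Bool.false_eq_true, if_false]
    have hsne : PySem.List.sorted entries (fun x => x) ≠ [] := by
      intro hnil
      exact h ((PySem.List.sorted_eq_nil_iff entries (fun x => x) false).mp hnil)
    cases hm : PySem.List.sorted entries (fun x => x) with
    | nil => exact absurd hm hsne
    | cons e0 rest =>
      simp only
      obtain ⟨r, rest', h'⟩ := runsB_head p rest e0
      have hk := keyA p rest [] [e0] e0 r rest' (by simp) h'
      simp only [List.nil_append] at hk
      rw [hk, h']
      simp

-- ===== VERDICT (by name: the statement is the Claim_ definition above) =====
theorem group_entry_names_spec : Claim_equal_group_entry_names := by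
  intro entries prefix_ _ _
  unfold Spec_group_entry_names
  exact main_eq entries prefix_
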